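-- pv_equiv track=rewrite | github.com/neurips2019submission/Formal-Language-Constraints-for-Markov-Decision-Processes | mujoco_experiments/baselines/constraint/predef_constraints.py | compute_actuation_constraint
-- ===== SOURCE A (Python) =====
-- import itertools
--
-- def compute_actuation_constraint(threshold, window=3):
--     candidates_list = []
--     for i in range(window + 1):
--         candidates = itertools.product(range(16), repeat=i)
--         candidates = filter(lambda x: sum(x) >= threshold, candidates)
--         candidates = map(lambda x: ''.join([str(hex(a)[2:]) for a in x]),
--                          candidates)
--         candidates = '|'.join(
--             list(map(lambda s: '({})'.format(s), candidates)))
--         candidates_list.append(candidates)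
--     return '|'.join(candidates_list)
-- ===== SOURCE B (Python) =====
-- def compute_actuation_constraint(threshold, window=3):
--     HEX = '0123456789abcdef'
--
--     def gen(i, need):
--         # i-digit lowercase-hex strings in lexicographic order whose digit sum is >= need;
--         # subtrees that cannot reach the remaining requirement are pruned outright.
--         if need > 15 * i:
--             return []
--         if i == 0:
--             return ['']
--         out = []
--         for d in range(16):
--             for s in gen(i - 1, need - d):
--                 out.append(HEX[d] + s)
--         return out
--
--     return '|'.join(
--         '|'.join('({})'.format(s) for s in gen(i, threshold))
--         for i in range(window + 1))
-- ===== Notes on version B (the rewrite author's own statement) =====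
-- stated objective: alternative
-- what changed: B builds the qualifying strings directly by a recursive branch-and-bound generator gen(i, need) that prepends one hex digit and recurses with the reduced requirement, pruning any subtree whose maximal remaining digit sum 15*i cannot reach need, instead of A's exhaustive itertools.product enumeration followed by a filter.
import Mathlib
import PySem

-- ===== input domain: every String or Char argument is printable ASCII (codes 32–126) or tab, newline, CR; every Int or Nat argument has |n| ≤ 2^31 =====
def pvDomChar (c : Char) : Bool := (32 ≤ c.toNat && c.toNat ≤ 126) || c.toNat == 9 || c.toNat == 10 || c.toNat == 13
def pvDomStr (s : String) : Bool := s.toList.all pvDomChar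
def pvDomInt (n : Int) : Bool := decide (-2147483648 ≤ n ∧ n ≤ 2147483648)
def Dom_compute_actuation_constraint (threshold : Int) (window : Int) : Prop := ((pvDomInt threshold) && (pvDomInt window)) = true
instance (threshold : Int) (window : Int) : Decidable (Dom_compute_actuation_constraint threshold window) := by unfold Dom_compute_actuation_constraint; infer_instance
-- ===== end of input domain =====

-- B replaces A's enumerate-all-tuples-then-filter by a recursive branch-and-bound generator
-- that builds only qualifying strings, pruning subtrees that cannot reach the threshold;
-- objective: alternative (same worst-case cost).

-- ===== PORT A =====
-- hex(a)[2:] : exact for 0 ≤ a < 16, the only values A ever passes (digits of range(16))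
def pvHexTupleChar (a : Int) : Char :=
  if a < 10 then Char.ofNat (48 + a).toNat else Char.ofNat (87 + a).toNat

-- itertools.product(range(16), repeat=i) in itertools' lexicographic order (leftmost varies slowest)
def pvProduct : Nat → List (List Int)
  | 0 => [[]]
  | i + 1 => (PySem.List.pyRange 0 16 1).flatMap (fun d => (pvProduct i).map (fun x => d :: x))

def compute_actuation_constraint (threshold : Int) (window : Int) : String :=
  let candidates_list := (PySem.List.pyRange 0 (window + 1) 1).foldl (fun acc i =>
    let c1 := pvProduct i.toNat
    let c2 := c1.filter (fun x => decide (threshold ≤ x.sum))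
    let c3 := c2.map (fun x => PySem.Str.join "" (x.map (fun a => String.ofList [pvHexTupleChar a])))
    let c4 := PySem.Str.join "|" (c3.map (fun s => "(" ++ s ++ ")"))
    acc ++ [c4]) []
  PySem.Str.join "|" candidates_list

-- ===== PORT B =====
-- HEX = '0123456789abcdef', indexed only at 0..15
def pvHEX : List Char := ['0','1','2','3','4','5','6','7','8','9','a','b','c','d','e','f']

-- gen(i, need): i-digit hex strings (lex order) with digit sum >= need, pruning 'need > 15*i'
-- (i is the loop index of range(window+1), hence a Nat here)
def pvGen : Nat → Int → List String
  | 0, need => if 15 * ((0 : Nat) : Int) < need then [] else [""]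
  | j + 1, need =>
      if 15 * ((j + 1 : Nat) : Int) < need then []
      else (PySem.List.pyRange 0 16 1).foldl (fun out d =>
        (pvGen j (need - d)).foldl (fun out2 s =>
          out2 ++ [String.ofList [pvHEX.getD d.toNat ' '] ++ s]) out) []

def compute_actuation_constraint_alt (threshold : Int) (window : Int) : String :=
  PySem.Str.join "|" ((PySem.List.pyRange 0 (window + 1) 1).map (fun i =>
    PySem.Str.join "|" ((pvGen i.toNat threshold).map (fun s => "(" ++ s ++ ")"))))

-- ===== PRECONDITION & SPEC =====
def Spec_compute_actuation_constraint (threshold : Int) (window : Int) (out : String) : Prop := out = compute_actuation_constraint_alt threshold window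
instance (threshold : Int) (window : Int) (out : String) : Decidable (Spec_compute_actuation_constraint threshold window out) := by unfold Spec_compute_actuation_constraint; infer_instance

-- ===== CLAIM (what is proved, stated in full; the proofs are below) =====
def Claim_equal_compute_actuation_constraint : Prop := ∀ (threshold : Int) (window : Int), Dom_compute_actuation_constraint threshold window → Spec_compute_actuation_constraint threshold window (compute_actuation_constraint threshold window)

-- ===== LEMMAS AND PROOFS =====

-- A's rendering of one tuple (proof-side name for the lambda in A's port)
def pvRenderA (x : List Int) : String :=
  PySem.Str.join "" (x.map (fun a => String.ofList [pvHexTupleChar a]))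

theorem pvRenderA_toList (x : List Int) :
    (pvRenderA x).toList = x.map pvHexTupleChar := by
  rw [pvRenderA, PySem.Str.toList_join, List.map_map]
  have : (String.toList ∘ fun a => String.ofList [pvHexTupleChar a])
       = (fun c => [c]) ∘ pvHexTupleChar := by
    funext a; simp [String.toList_ofList]
  rw [this, ← List.map_map]
  exact PySem.Chars.join_nil_singletons (x.map pvHexTupleChar)

theorem pvHEX_eq (d : Int) (h0 : 0 ≤ d) (h16 : d < 16) :
    pvHEX.getD d.toNat ' ' = pvHexTupleChar d := by
  obtain ⟨m, rfl⟩ : ∃ m : Nat, d = (m : Int) := ⟨d.toNat, by omega⟩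
  have hm : m < 16 := by exact_mod_cast h16
  interval_cases m <;> decide

theorem pvRenderA_cons (d : Int) (h0 : 0 ≤ d) (h16 : d < 16) (x : List Int) :
    String.ofList [pvHEX.getD d.toNat ' '] ++ pvRenderA x = pvRenderA (d :: x) := by
  apply String.toList_inj.mp
  rw [String.toList_append, String.toList_ofList, pvRenderA_toList, pvRenderA_toList,
    List.map_cons, pvHEX_eq d h0 h16]
  rfl

theorem pvSum_le (k : Nat) : ∀ x ∈ pvProduct k, x.sum ≤ 15 * (k : Int) := by
  induction k with
  | zero => intro x hx; simp [pvProduct] at hx; simp [hx]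
  | succ k ih =>
      intro x hx
      simp only [pvProduct, List.mem_flatMap, List.mem_map] at hx
      obtain ⟨d, hd, y, hy, rfl⟩ := hx
      rw [PySem.List.mem_pyRange_one] at hd
      have := ih y hy
      rw [List.sum_cons]
      push_cast
      omega

theorem pvGen_eq (k : Nat) : ∀ (t : Int),
    pvGen k t = ((pvProduct k).filter (fun x => decide (t ≤ x.sum))).map pvRenderA := by
  induction k with
  | zero =>
      intro t
      by_cases h : 0 < t
      · rw [pvGen, if_pos (by exact_mod_cast (by omega : (0:Int) < t))]
        simp [pvProduct, show ¬ t ≤ 0 by omega]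
      · rw [pvGen, if_neg (by push_cast; omega)]
        simp only [pvProduct, List.filter]
        rw [show decide (t ≤ ([] : List Int).sum) = true by simp; omega]
        rfl
  | succ j ih =>
      intro t
      by_cases hp : 15 * ((j + 1 : Nat) : Int) < t
      · rw [pvGen, if_pos hp]
        symm
        rw [List.map_eq_nil_iff, List.filter_eq_nil_iff]
        intro x hx
        have := pvSum_le (j + 1) x hx
        simp only [decide_eq_true_eq]
        omega
      · rw [pvGen, if_neg hp]
        have hin : (fun (out : List String) (d : Int) =>
            (pvGen j (t - d)).foldl (fun out2 s =>
              out2 ++ [String.ofList [pvHEX.getD d.toNat ' '] ++ s]) out)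
          = fun out d => out ++ (pvGen j (t - d)).map
              (fun s => String.ofList [pvHEX.getD d.toNat ' '] ++ s) := by
          funext out d
          exact PySem.List.foldl_append_singleton_eq_map _ _ _
        rw [hin, PySem.List.foldl_append_eq_flatMap, List.nil_append]
        show _ = (((PySem.List.pyRange 0 16 1).flatMap
            (fun d => (pvProduct j).map (fun x => d :: x))).filter
              (fun x => decide (t ≤ x.sum))).map pvRenderA
        rw [List.filter_flatMap, List.map_flatMap]
        apply List.flatMap_congr
        intro d hd
        rw [PySem.List.mem_pyRange_one] at hd
        rw [List.filter_map, ih (t - d), List.map_map, List.map_map]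
        have hfilter : ((fun x => decide (t ≤ x.sum)) ∘ fun x => d :: x)
            = fun x : List Int => decide (t - d ≤ x.sum) := by
          funext x
          simp only [Function.comp, List.sum_cons]
          exact decide_eq_decide.mpr (by omega)
        rw [hfilter]
        apply List.map_congr_left
        intro x _
        simp only [Function.comp]
        exact pvRenderA_cons d hd.1 hd.2 x

-- ===== VERDICT (by name: the statement is the Claim_ definition above) =====
theorem compute_actuation_constraint_spec : Claim_equal_compute_actuation_constraint := by
  intro threshold window _
  simp only [Spec_compute_actuation_constraint, compute_actuation_constraint,
    compute_actuation_constraint_alt]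
  rw [PySem.List.foldl_append_singleton_eq_map, List.nil_append]
  congr 1
  apply List.map_congr_left
  intro i _
  rw [pvGen_eq i.toNat threshold]
  rfl
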